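-- pv_equiv track=rewrite | github.com/MemorySlice/MemDiver | tests/fixtures/benchmark_experiment.py | _get_aligned_block_starts
-- ===== SOURCE A (Python) =====
-- def _get_aligned_block_starts(candidates: set, alignment: int = 16,
--                               block_size: int = 32) -> list:
--     """Get sorted list of aligned block start offsets from filtered candidates."""
--     if not candidates:
--         return []
--     starts = set()
--     for o in candidates:
--         starts.add((o // alignment) * alignment)
--     return sorted(starts)
-- ===== SOURCE B (Python) =====
-- def _get_aligned_block_starts(candidates: set, alignment: int = 16,
--                               block_size: int = 32) -> list:
--     """Maintain the sorted unique result incrementally: for each candidate,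
--     insert its aligned value at its sorted position unless already present.
--     No set and no sort call are used at all."""
--     out = []
--     for o in candidates:
--         v = (o // alignment) * alignment
--         i = 0
--         while i < len(out) and out[i] < v:
--             i += 1
--         if i == len(out) or out[i] != v:
--             out.insert(i, v)
--     return out
-- ===== Notes on version B (the rewrite author's own statement) =====
-- stated objective: alternative
-- what changed: Replaces hash-set dedup followed by a library sort with incremental ordered insertion: the sorted duplicate-free output is maintained directly by inserting each aligned value at its sorted position (skipping it if present), using no set and no sort call.
import Mathlib
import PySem

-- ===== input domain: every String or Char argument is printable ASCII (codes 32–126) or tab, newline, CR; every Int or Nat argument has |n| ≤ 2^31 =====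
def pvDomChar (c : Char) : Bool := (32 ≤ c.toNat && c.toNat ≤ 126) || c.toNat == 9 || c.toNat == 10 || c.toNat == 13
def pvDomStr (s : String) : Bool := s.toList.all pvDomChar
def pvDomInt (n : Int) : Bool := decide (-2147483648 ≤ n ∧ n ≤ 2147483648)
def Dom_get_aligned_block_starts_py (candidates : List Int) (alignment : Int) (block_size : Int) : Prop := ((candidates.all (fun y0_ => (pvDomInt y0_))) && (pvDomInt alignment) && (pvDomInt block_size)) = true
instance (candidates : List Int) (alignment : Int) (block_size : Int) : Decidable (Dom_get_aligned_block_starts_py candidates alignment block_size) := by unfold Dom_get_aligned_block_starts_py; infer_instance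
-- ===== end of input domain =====

-- B replaces A's hash-set dedup + library sort by incremental ordered insertion
-- (no set, no sort call); return values proved equal.

-- ===== PORT A =====
-- A: build a set of (o // alignment) * alignment, then return sorted(starts).
def get_aligned_block_starts_py (candidates : List Int) (alignment : Int) (block_size : Int) : List Int :=
  if candidates = [] then []
  else
    let starts : PySem.Set Int :=
      candidates.foldl (fun s o => PySem.Set.add s (PySem.Int.floordiv o alignment * alignment)) PySem.Set.empty
    PySem.List.sorted starts (fun x => x) false

-- ===== PORT B =====
-- B's inner while/insert: skip the prefix of elements < v, drop v if already
-- present, otherwise insert it at this position.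
def pvInsertSorted (v : Int) : List Int → List Int
  | [] => [v]
  | x :: xs => if x < v then x :: pvInsertSorted v xs
               else if x = v then x :: xs
               else v :: x :: xs

-- B: fold over the candidates, inserting each aligned value in sorted position.
def get_aligned_block_starts_py_alt (candidates : List Int) (alignment : Int) (block_size : Int) : List Int :=
  candidates.foldl (fun out o => pvInsertSorted (PySem.Int.floordiv o alignment * alignment) out) []

-- ===== PRECONDITION & SPEC =====
-- Pre_ excludes exactly the inputs where Python A raises ZeroDivisionError:
-- alignment = 0 with a nonempty candidates set.
def Pre_get_aligned_block_starts_py (candidates : List Int) (alignment : Int) (block_size : Int) : Prop :=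
  candidates = [] ∨ alignment ≠ 0
instance (candidates : List Int) (alignment : Int) (block_size : Int) : Decidable (Pre_get_aligned_block_starts_py candidates alignment block_size) := by unfold Pre_get_aligned_block_starts_py; infer_instance

def pvWitness_get_aligned_block_starts_py : List Int × Int × Int := ([3, 17, -5, 17], 16, 32)

def Spec_get_aligned_block_starts_py (candidates : List Int) (alignment : Int) (block_size : Int) (out : List Int) : Prop := out = get_aligned_block_starts_py_alt candidates alignment block_size
instance (candidates : List Int) (alignment : Int) (block_size : Int) (out : List Int) : Decidable (Spec_get_aligned_block_starts_py candidates alignment block_size out) := by unfold Spec_get_aligned_block_starts_py; infer_instance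

-- ===== CLAIM (what is proved, stated in full; the proofs are below) =====
def Claim_equal_get_aligned_block_starts_py : Prop := ∀ (candidates : List Int) (alignment : Int) (block_size : Int), Dom_get_aligned_block_starts_py candidates alignment block_size → Pre_get_aligned_block_starts_py candidates alignment block_size → Spec_get_aligned_block_starts_py candidates alignment block_size (get_aligned_block_starts_py candidates alignment block_size)

-- ===== LEMMAS AND PROOFS =====

theorem pvInsert_mem (v : Int) (l : List Int) (x : Int) :
    x ∈ pvInsertSorted v l ↔ x = v ∨ x ∈ l := by
  induction l with
  | nil => simp [pvInsertSorted]
  | cons y ys ih =>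
    by_cases h1 : y < v
    · simp only [pvInsertSorted, if_pos h1, List.mem_cons, ih]; tauto
    · by_cases h2 : y = v
      · subst h2; simp only [pvInsertSorted, if_neg h1, decide_eq_true_eq, if_true, List.mem_cons]; tauto
      · simp only [pvInsertSorted, if_neg h1, if_neg h2, List.mem_cons]

theorem pvInsert_sorted (v : Int) (l : List Int) (h : l.Pairwise (· < ·)) :
    (pvInsertSorted v l).Pairwise (· < ·) := by
  induction l with
  | nil => simp [pvInsertSorted]
  | cons y ys ih =>
    by_cases h1 : y < v
    · simp only [pvInsertSorted, if_pos h1]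
      refine List.pairwise_cons.mpr ⟨?_, ih h.of_cons⟩
      intro a ha
      rcases (pvInsert_mem v ys a).mp ha with rfl | ha'
      · exact h1
      · exact List.rel_of_pairwise_cons h ha'
    · by_cases h2 : y = v
      · simpa [pvInsertSorted, if_neg h1, if_pos h2] using h
      · have hv : v < y := by omega
        simp only [pvInsertSorted, if_neg h1, if_neg h2]
        refine List.pairwise_cons.mpr ⟨?_, h⟩
        intro a ha
        rcases List.mem_cons.mp ha with rfl | ha'
        · exact hv
        · exact lt_trans hv (List.rel_of_pairwise_cons h ha')

-- The insertion fold keeps the accumulator strictly sorted, and its members are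
-- the accumulator's members plus the images of the processed candidates.
theorem pv_fold_insert (f : Int → Int) (cs : List Int) : ∀ (acc : List Int),
    acc.Pairwise (· < ·) →
    (cs.foldl (fun out o => pvInsertSorted (f o) out) acc).Pairwise (· < ·) ∧
    (∀ x, x ∈ cs.foldl (fun out o => pvInsertSorted (f o) out) acc ↔ x ∈ acc ∨ x ∈ cs.map f) := by
  induction cs with
  | nil => intro acc ha; simpa using ha
  | cons c cs ih =>
    intro acc ha
    have hrec := ih (pvInsertSorted (f c) acc) (pvInsert_sorted _ _ ha)
    refine ⟨hrec.1, fun x => ?_⟩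
    rw [List.foldl_cons, hrec.2 x, pvInsert_mem]
    simp only [List.map_cons, List.mem_cons]
    tauto

theorem get_aligned_block_starts_py_spec : Claim_equal_get_aligned_block_starts_py := by
  intro candidates alignment block_size _ _
  unfold Spec_get_aligned_block_starts_py get_aligned_block_starts_py get_aligned_block_starts_py_alt
  set f : Int → Int := fun o => PySem.Int.floordiv o alignment * alignment with hf
  set ys := candidates.map f with hys
  have hset : (candidates.foldl (fun s o => PySem.Set.add s (PySem.Int.floordiv o alignment * alignment)) PySem.Set.empty)
      = PySem.Set.ofList ys := by
    rw [PySem.Set.ofList_eq_foldl, hys, List.foldl_map]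
    rfl
  by_cases hc : candidates = []
  · subst hc; rfl
  · rw [if_neg hc, hset]
    have hrec := pv_fold_insert f candidates [] List.Pairwise.nil
    set r := candidates.foldl (fun out o => pvInsertSorted (f o) out) [] with hr
    have hmem : ∀ x, x ∈ r ↔ x ∈ PySem.Set.ofList ys := by
      intro x
      rw [hrec.2 x, PySem.Set.mem_ofList]
      simp [hys]
    have hperm : r.Perm (PySem.Set.ofList ys) :=
      (List.perm_ext_iff_of_nodup hrec.1.nodup (PySem.Set.nodup_ofList ys)).mpr hmem
    exact PySem.List.sorted_eq_of_perm_of_pairwise_lt _ r (fun x => x) hperm hrec.1
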